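-- pv_equiv track=rewrite | github.com/clovery410/mycode | interview_qa/twitter/tweet_recommendation.py | getRecommendedTweets
-- ===== SOURCE A (Python) =====
-- import collections
--
-- def getRecommendedTweets(followGraph_edges, likeGraph_edges, targetUser, minLikeThreshold):
--     recommendation = []
--     follows = getFollowingRelationship(followGraph_edges)
--     liked_tweets = getLikedTweets(likeGraph_edges)
--     tweets_count = collections.defaultdict(int)
--     following_list = follows[targetUser]
--     for person in following_list:
--         for tweet in liked_tweets[person]:
--             tweets_count[tweet] += 1
--     for tweet, count in tweets_count.items():
--         if count >= minLikeThreshold: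
--             recommendation.append(tweet)
--     return sorted(recommendation)
--
-- def getFollowingRelationship(followGraph_edges):
--     follows = collections.defaultdict(set)
--     for follower, followee in followGraph_edges:
--         follows[follower].add(followee)
--     return follows
--
-- def getLikedTweets(likeGraph_edges):
--     liked_tweets = collections.defaultdict(set)
--     for person, tweet in likeGraph_edges:
--         liked_tweets[person].add(tweet)
--     return liked_tweets
-- ===== SOURCE B (Python) =====
-- def getRecommendedTweets(followGraph_edges, likeGraph_edges, targetUser, minLikeThreshold):
--     followees = {b for a, b in followGraph_edges if a == targetUser}
--     seen = set()
--     counts = {}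
--     for person, tweet in likeGraph_edges:
--         if person in followees and (person, tweet) not in seen:
--             seen.add((person, tweet))
--             counts[tweet] = counts.get(tweet, 0) + 1
--     return sorted(t for t, c in counts.items() if c >= minLikeThreshold)
-- ===== Notes on version B (the rewrite author's own statement) =====
-- stated objective: simpler
-- what changed: Instead of building full follower->followees and person->liked-tweets defaultdict-of-set graphs and running a nested followee/tweet loop, B builds just the target user's followee set and makes one filtered pass over the like edges with a seen-set deduplicating (person, tweet) pairs into a single counter.
import Mathlib
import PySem

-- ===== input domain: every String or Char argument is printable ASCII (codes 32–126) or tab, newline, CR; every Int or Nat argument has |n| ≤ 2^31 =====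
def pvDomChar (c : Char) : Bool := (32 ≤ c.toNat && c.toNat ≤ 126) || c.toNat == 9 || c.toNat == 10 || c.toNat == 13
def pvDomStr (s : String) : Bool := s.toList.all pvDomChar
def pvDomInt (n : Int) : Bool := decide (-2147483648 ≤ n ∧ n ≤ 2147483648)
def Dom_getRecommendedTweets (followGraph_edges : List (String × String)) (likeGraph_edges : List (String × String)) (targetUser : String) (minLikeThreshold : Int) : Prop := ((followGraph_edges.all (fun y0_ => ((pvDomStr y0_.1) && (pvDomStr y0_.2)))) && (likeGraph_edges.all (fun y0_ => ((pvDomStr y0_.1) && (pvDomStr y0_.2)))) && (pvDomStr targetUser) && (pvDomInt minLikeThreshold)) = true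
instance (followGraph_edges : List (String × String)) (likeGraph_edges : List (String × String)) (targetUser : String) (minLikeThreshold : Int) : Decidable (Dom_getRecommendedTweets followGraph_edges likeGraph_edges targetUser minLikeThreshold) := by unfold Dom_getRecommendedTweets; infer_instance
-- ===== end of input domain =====

-- B replaces A's two defaultdict-of-set graphs plus nested followee→tweet loop by a single
-- filtered pass over the like edges with a seen-set for dedup and one counter (objective: simpler).

-- ===== PORT A =====
-- helper getFollowingRelationship / getLikedTweets: defaultdict(set) built edge by edge
def pvGroupSets (edges : List (String × String)) : PySem.Dict String (List String) :=
  edges.foldl (fun d e => d.modify e.1 [] (fun s => PySem.Set.add s e.2)) PySem.Dict.empty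

def getRecommendedTweets (followGraph_edges : List (String × String)) (likeGraph_edges : List (String × String)) (targetUser : String) (minLikeThreshold : Int) : List String :=
  let follows := pvGroupSets followGraph_edges
  let liked_tweets := pvGroupSets likeGraph_edges
  let following_list := follows.getD targetUser []
  let tweets_count : PySem.Dict String Int :=
    following_list.foldl
      (fun c person => (liked_tweets.getD person []).foldl (fun c tweet => c.modify tweet 0 (· + 1)) c)
      PySem.Dict.empty
  let recommendation :=
    tweets_count.items.foldl (fun r it => if it.2 ≥ minLikeThreshold then r ++ [it.1] else r) []
  PySem.List.sorted recommendation (fun x => x) false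

-- ===== PORT B =====
def getRecommendedTweets_alt (followGraph_edges : List (String × String)) (likeGraph_edges : List (String × String)) (targetUser : String) (minLikeThreshold : Int) : List String :=
  let followees : PySem.Set String :=
    PySem.Set.ofList ((followGraph_edges.filter (fun e => e.1 == targetUser)).map (·.2))
  let st : PySem.Set (String × String) × PySem.Dict String Int :=
    likeGraph_edges.foldl
      (fun st e =>
        if followees.contains e.1 && !(st.1.contains e) then
          (st.1.add e, st.2.insert e.2 (st.2.getD e.2 0 + 1))
        else st)
      (PySem.Set.empty, PySem.Dict.empty)
  PySem.List.sorted ((st.2.items.filter (fun it => it.2 ≥ minLikeThreshold)).map (·.1)) (fun x => x) false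

-- ===== PRECONDITION & SPEC =====
def Spec_getRecommendedTweets (followGraph_edges : List (String × String)) (likeGraph_edges : List (String × String)) (targetUser : String) (minLikeThreshold : Int) (out : List String) : Prop := out = getRecommendedTweets_alt followGraph_edges likeGraph_edges targetUser minLikeThreshold
instance (followGraph_edges : List (String × String)) (likeGraph_edges : List (String × String)) (targetUser : String) (minLikeThreshold : Int) (out : List String) : Decidable (Spec_getRecommendedTweets followGraph_edges likeGraph_edges targetUser minLikeThreshold out) := by unfold Spec_getRecommendedTweets; infer_instance

-- ===== CLAIM (what is proved, stated in full; the proofs are below) =====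
def Claim_equal_getRecommendedTweets : Prop := ∀ (followGraph_edges : List (String × String)) (likeGraph_edges : List (String × String)) (targetUser : String) (minLikeThreshold : Int), Dom_getRecommendedTweets followGraph_edges likeGraph_edges targetUser minLikeThreshold → Spec_getRecommendedTweets followGraph_edges likeGraph_edges targetUser minLikeThreshold (getRecommendedTweets followGraph_edges likeGraph_edges targetUser minLikeThreshold)

-- ===== LEMMAS AND PROOFS =====

-- what `pvGroupSets edges` answers for any key, state-generalised over the accumulator dict
theorem pvGroupSets_getD_gen (edges : List (String × String)) (d : PySem.Dict String (List String)) (u : String) :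
    (edges.foldl (fun d e => d.modify e.1 [] (fun s => PySem.Set.add s e.2)) d).getD u []
    = PySem.Set.update (d.getD u []) ((edges.filter (fun e => e.1 == u)).map (·.2)) := by
  induction edges generalizing d with
  | nil => simp [PySem.Set.update]
  | cons e es ih =>
    simp only [List.foldl_cons, ih, List.filter_cons]
    by_cases h : e.1 = u
    · simp [h, PySem.Set.update, PySem.Dict.getD_modify_self]
    · have hb : (e.1 == u) = false := by simp [h]
      simp [hb, PySem.Dict.getD_modify_of_ne _ _ _ (Ne.symm h)]

theorem pvGroupSets_getD (edges : List (String × String)) (u : String) :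
    (pvGroupSets edges).getD u [] = PySem.Set.ofList ((edges.filter (fun e => e.1 == u)).map (·.2)) := by
  rw [pvGroupSets, pvGroupSets_getD_gen, PySem.Set.ofList_eq_foldl]
  simp [PySem.Dict.empty, PySem.Dict.getD, PySem.Dict.get?, PySem.Set.update]

-- the pairs B's loop actually counts, in order (first occurrences not already in `s`)
def pvNew (followees : PySem.Set String) : List (String × String) → PySem.Set (String × String) → List (String × String)
  | [], _ => []
  | e :: es, s =>
    if followees.contains e.1 && !(s.contains e) then e :: pvNew followees es (s.add e)
    else pvNew followees es s

-- B's fold, state-generalised: the final dict is `counts` bumped once per pair in `pvNew`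
theorem pvLoopB (followees : PySem.Set String) (l : List (String × String))
    (seen : PySem.Set (String × String)) (counts : PySem.Dict String Int) :
    (l.foldl
      (fun (st : PySem.Set (String × String) × PySem.Dict String Int) e =>
        if followees.contains e.1 && !(st.1.contains e) then
          (st.1.add e, st.2.insert e.2 (st.2.getD e.2 0 + 1))
        else st)
      (seen, counts)).2
    = ((pvNew followees l seen).map (·.2)).foldl (fun c t => c.insert t (c.getD t 0 + 1)) counts := by
  induction l generalizing seen counts with
  | nil => simp [pvNew]
  | cons e es ih =>
    simp only [List.foldl_cons, pvNew]
    by_cases h : (followees.contains e.1 && !(seen.contains e)) = true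
    · rw [if_pos h, if_pos h, ih]
      simp [List.map_cons, List.foldl_cons]
    · rw [if_neg h, if_neg h, ih]

theorem pvNew_update (followees : PySem.Set String) (l : List (String × String))
    (seen : PySem.Set (String × String)) :
    seen ++ pvNew followees l seen
    = PySem.Set.update seen (l.filter (fun e => followees.contains e.1)) := by
  induction l generalizing seen with
  | nil => simp [pvNew, PySem.Set.update]
  | cons e es ih =>
    simp only [pvNew, List.filter_cons]
    by_cases hf : followees.contains e.1 = true
    · have hm1 : e.1 ∈ followees := by simpa using hf
      by_cases hs : seen.contains e = true
      · have hm2 : e ∈ seen := by simpa using hs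
        have ha : PySem.Set.add seen e = seen := by simp [PySem.Set.add, hm2]
        rw [if_pos hf, if_neg (by simp [hm2]),
          show PySem.Set.update seen (e :: es.filter (fun e => followees.contains e.1))
              = PySem.Set.update (seen.add e) (es.filter (fun e => followees.contains e.1)) from rfl,
          ha]
        exact ih seen
      · have hm2 : e ∉ seen := by simpa using hs
        have ha : PySem.Set.add seen e = seen ++ [e] := by simp [PySem.Set.add, hm2]
        rw [if_pos hf, if_pos (by simp [hm1, hm2]),
          show PySem.Set.update seen (e :: es.filter (fun e => followees.contains e.1))
              = PySem.Set.update (seen.add e) (es.filter (fun e => followees.contains e.1)) from rfl,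
          show seen ++ e :: pvNew followees es (seen.add e)
              = (seen ++ [e]) ++ pvNew followees es (seen.add e) by simp,
          ← ha]
        exact ih (seen.add e)
    · have hm1 : e.1 ∉ followees := by simpa using hf
      rw [if_neg hf, if_neg (by simp [hm1])]
      exact ih seen

theorem pvNew_empty (followees : PySem.Set String) (l : List (String × String)) :
    pvNew followees l PySem.Set.empty
    = PySem.Set.ofList (l.filter (fun e => followees.contains e.1)) := by
  have h := pvNew_update followees l PySem.Set.empty
  simpa [PySem.Set.empty, PySem.Set.update, PySem.Set.ofList_eq_foldl] using h

-- the recommendation list drawn from `counter L`: the distinct elements of L whose count clears the bar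
theorem pvRecOf (L : List String) (θ : Int) :
    ((PySem.Dict.counter L).items.filter (fun it => it.2 ≥ θ)).map (·.1)
    = (PySem.Set.ofList L).filter (fun t => ((L.count t : Int) ≥ θ : Bool)) := by
  rw [PySem.Dict.items_counter, List.filter_map, List.map_map]
  simp [Function.comp_def]

-- membership of the inner liked-set: t is liked by p iff the edge (p, t) is present
theorem pvMemInner (l : List (String × String)) (p t : String) :
    t ∈ PySem.Set.ofList ((l.filter (fun e => e.1 == p)).map (·.2)) ↔ (p, t) ∈ l := by
  rw [PySem.Set.mem_ofList]
  simp only [List.mem_map, List.mem_filter, beq_iff_eq]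
  constructor
  · rintro ⟨e, ⟨he, h1⟩, h2⟩
    have : e = (p, t) := by cases e; simp_all
    rwa [this] at he
  · intro h
    exact ⟨(p, t), ⟨h, rfl⟩, rfl⟩

-- core count lemma: person-major (A) and edge-major deduped (B) counting agree
theorem pvCountEq (F : List String) (hF : F.Nodup) (l : List (String × String)) (t : String) :
    (F.flatMap (fun p => PySem.Set.ofList ((l.filter (fun e => e.1 == p)).map (·.2)))).count t
    = ((PySem.Set.ofList (l.filter (fun e => PySem.Set.contains F e.1))).map (·.2)).count t := by
  have h1 : ∀ (G : List String),
      (G.flatMap (fun p => PySem.Set.ofList ((l.filter (fun e => e.1 == p)).map (·.2)))).count t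
      = G.countP (fun p => decide ((p, t) ∈ l)) := by
    intro G
    induction G with
    | nil => simp
    | cons p G ih =>
      rw [List.flatMap_cons, List.count_append, ih, List.countP_cons]
      by_cases hm : (p, t) ∈ l
      · rw [List.count_eq_one_of_mem (PySem.Set.nodup_ofList _) ((pvMemInner l p t).mpr hm)]
        simp [hm, Nat.add_comm]
      · rw [List.count_eq_zero.mpr (fun hc => hm ((pvMemInner l p t).mp hc))]
        simp [hm]
  rw [h1, List.countP_eq_length_filter]
  -- RHS to a filter length
  rw [List.count_eq_countP, List.countP_map, List.countP_eq_length_filter]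
  -- bijection between the two filtered lists
  have hinj : Function.Injective (fun p : String => (p, t)) := by
    intro a b h; simpa using congrArg Prod.fst h
  have nod1 : ((F.filter (fun p => decide ((p, t) ∈ l))).map (fun p => (p, t))).Nodup :=
    (hF.filter _).map hinj
  have nodD : (PySem.Set.ofList (l.filter (fun e => PySem.Set.contains F e.1))).Nodup :=
    PySem.Set.nodup_ofList _
  have nod2 : ((PySem.Set.ofList (l.filter (fun e => PySem.Set.contains F e.1))).filter
      ((fun x => x == t) ∘ (·.2))).Nodup := nodD.filter _
  have hmem : ∀ (x : String × String),
      (x ∈ (F.filter (fun p => decide ((p, t) ∈ l))).map (fun p => (p, t))) ↔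
      (x ∈ (PySem.Set.ofList (l.filter (fun e => PySem.Set.contains F e.1))).filter
        ((fun x => x == t) ∘ (·.2))) := by
    intro x
    rw [List.mem_filter, PySem.Set.mem_ofList, List.mem_filter]
    simp only [List.mem_map, List.mem_filter, decide_eq_true_eq, Function.comp, beq_iff_eq]
    constructor
    · rintro ⟨p, ⟨hpF, hpl⟩, rfl⟩
      exact ⟨⟨hpl, by simpa using hpF⟩, rfl⟩
    · rintro ⟨⟨hxl, hxF⟩, hxt⟩
      obtain ⟨a, b⟩ := x
      simp only at hxt
      subst hxt
      exact ⟨a, ⟨by simpa using hxF, hxl⟩, rfl⟩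
  have hperm := (List.perm_ext_iff_of_nodup nod1 nod2).mpr hmem
  calc (F.filter (fun p => decide ((p, t) ∈ l))).length
      = ((F.filter (fun p => decide ((p, t) ∈ l))).map (fun p => (p, t))).length := by
        rw [List.length_map]
    _ = _ := hperm.length_eq

-- two count-equal pools give the same sorted recommendation list
theorem pvFinal (LA LB : List String) (θ : Int) (hc : ∀ t, LA.count t = LB.count t) :
    PySem.List.sorted ((PySem.Set.ofList LA).filter (fun t => ((LA.count t : Int) ≥ θ : Bool))) (fun x => x) false
    = PySem.List.sorted ((PySem.Set.ofList LB).filter (fun t => ((LB.count t : Int) ≥ θ : Bool))) (fun x => x) false := by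
  apply PySem.List.sorted_eq_sorted_of_perm _ _ _ (fun a b h => h)
  apply (List.perm_ext_iff_of_nodup ((PySem.Set.nodup_ofList _).filter _)
    ((PySem.Set.nodup_ofList _).filter _)).mpr
  intro t
  rw [List.mem_filter, List.mem_filter, PySem.Set.mem_ofList, PySem.Set.mem_ofList,
    ← List.count_pos_iff, ← List.count_pos_iff, hc]

-- ===== VERDICT (by name: the statement is the Claim_ definition above) =====
theorem getRecommendedTweets_spec : Claim_equal_getRecommendedTweets := by
  intro f l target θ _dom
  unfold Spec_getRecommendedTweets getRecommendedTweets getRecommendedTweets_alt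
  have hAppend : ∀ (items : List (String × Int)),
      items.foldl (fun r it => if it.2 ≥ θ then r ++ [it.1] else r) []
      = (items.filter (fun it => it.2 ≥ θ)).map (·.1) := by
    intro items
    have h := PySem.List.foldl_append_if (fun it : String × Int => it.2 ≥ θ) (·.1) items []
    simpa using h
  simp only [pvGroupSets_getD, pvLoopB, pvNew_empty,
    PySem.Dict.foldl_insert_getD_add_one_eq_counter, ← List.foldl_flatMap,
    ← PySem.Dict.counter_eq_foldl, hAppend, pvRecOf]
  exact pvFinal _ _ θ (pvCountEq _ (PySem.Set.nodup_ofList _) l)
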